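-- pv_equiv track=rewrite | github.com/UjlakanAdam/osztalyzatok | feladatok2.py | feladat51
-- ===== SOURCE A (Python) =====
-- def feladat51(szamok):
--     cv=0
--
--     egyes=0
--
--     ketes=0
--
--     harmas=0
--
--     neyges=0
--
--     otot=0
--
--     while cv<len(szamok):
--
--         lista=szamok[cv]
--
--         if lista==1:
--             egyes+=1
--
--         elif lista == 2:
--             ketes += 1
--
--         elif lista == 3:
--             harmas += 1
--
--         elif lista == 4:
--             neyges += 1
--
--         else:
--             otot +=1
--
--         cv+=1
--
--     listi = []
--     listi.append(egyes)
--     listi.append(ketes)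
--     listi.append(harmas)
--     listi.append(neyges)
--     listi.append(otot)
--     return listi
-- ===== SOURCE B (Python) =====
-- def feladat51(szamok):
--     firsts = [szamok.count(g) for g in (1, 2, 3, 4)]
--     return firsts + [len(szamok) - sum(firsts)]
-- ===== Notes on version B (the rewrite author's own statement) =====
-- stated objective: idiomatic
-- what changed: Replaces the index-driven while loop with five counter branches by per-grade list.count passes, deriving the catch-all fifth bucket as len minus the sum of the first four.
import Mathlib
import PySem

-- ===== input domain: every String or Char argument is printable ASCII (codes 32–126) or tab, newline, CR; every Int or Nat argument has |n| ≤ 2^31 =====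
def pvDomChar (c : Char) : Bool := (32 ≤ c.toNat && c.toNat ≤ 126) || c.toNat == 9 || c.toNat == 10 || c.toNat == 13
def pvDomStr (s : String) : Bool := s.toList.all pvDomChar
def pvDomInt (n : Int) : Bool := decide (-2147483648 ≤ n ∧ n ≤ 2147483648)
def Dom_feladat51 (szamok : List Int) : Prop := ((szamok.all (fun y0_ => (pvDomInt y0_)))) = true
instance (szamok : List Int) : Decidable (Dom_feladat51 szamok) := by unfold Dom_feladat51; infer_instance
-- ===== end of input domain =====

-- B replaces A's single while loop with five branch counters by four list.count passes
-- plus a subtraction for the catch-all bucket (idiomatic; return value only).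

-- ===== PORT A =====
-- A's while loop over cv with five running counters, as structural recursion over the list
def feladat51Go (xs : List Int) (egyes ketes harmas neyges otot : Int) : List Int :=
  match xs with
  | [] => [egyes, ketes, harmas, neyges, otot]
  | lista :: rest =>
    if lista == 1 then feladat51Go rest (egyes + 1) ketes harmas neyges otot
    else if lista == 2 then feladat51Go rest egyes (ketes + 1) harmas neyges otot
    else if lista == 3 then feladat51Go rest egyes ketes (harmas + 1) neyges otot
    else if lista == 4 then feladat51Go rest egyes ketes harmas (neyges + 1) otot
    else feladat51Go rest egyes ketes harmas neyges (otot + 1)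

def feladat51 (szamok : List Int) : List Int :=
  feladat51Go szamok 0 0 0 0 0

-- ===== PORT B =====
def feladat51_alt (szamok : List Int) : List Int :=
  let firsts : List Int := [1, 2, 3, 4].map (fun g => (PySem.List.count szamok g : Int))
  firsts ++ [(szamok.length : Int) - firsts.sum]

-- ===== PRECONDITION & SPEC =====
def Spec_feladat51 (szamok : List Int) (out : List Int) : Prop := out = feladat51_alt szamok
instance (szamok : List Int) (out : List Int) : Decidable (Spec_feladat51 szamok out) := by unfold Spec_feladat51; infer_instance

-- ===== CLAIM (what is proved, stated in full; the proofs are below) =====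
def Claim_equal_feladat51 : Prop := ∀ (szamok : List Int), Dom_feladat51 szamok → Spec_feladat51 szamok (feladat51 szamok)

-- ===== LEMMAS AND PROOFS =====
theorem feladat51Go_eq (xs : List Int) (e k h n o : Int) :
    feladat51Go xs e k h n o =
      [e + (xs.count 1 : Int), k + (xs.count 2 : Int), h + (xs.count 3 : Int),
       n + (xs.count 4 : Int),
       o + ((xs.length : Int) -
            ((xs.count 1 : Int) + (xs.count 2 : Int) + (xs.count 3 : Int) + (xs.count 4 : Int)))] := by
  induction xs generalizing e k h n o with
  | nil => simp [feladat51Go]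
  | cons x rest ih =>
    simp only [feladat51Go, List.count_cons, List.length_cons]
    by_cases h1 : x = 1 <;> by_cases h2 : x = 2 <;> by_cases h3 : x = 3 <;> by_cases h4 : x = 4 <;>
      simp [h1, h2, h3, h4, ih] <;> push_cast <;> omega

theorem feladat51_spec' (szamok : List Int) : feladat51 szamok = feladat51_alt szamok := by
  simp [feladat51, feladat51_alt, feladat51Go_eq, PySem.List.count_eq]
  omega

-- ===== VERDICT (by name: the statement is the Claim_ definition above) =====
theorem feladat51_spec : Claim_equal_feladat51 := by
  intro szamok _
  exact feladat51_spec' szamok
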